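-- pv_equiv track=rewrite | github.com/bdw2292/molecular-cluster-enumeration | clustergenerator.py | GeneratePermutation
-- ===== SOURCE A (Python) =====
-- def GeneratePermutation(indextodistancetoaxis):
--     indextopermindex={}
--     for index,distance in indextodistancetoaxis.items():
--         if distance==0:
--             indextopermindex[index]=index
--         else:
--             for otherindex,otherdistance in indextodistancetoaxis.items():
--                 if otherdistance==distance and index!=otherindex:
--                     indextopermindex[index]=otherindex
--     return indextopermindex
-- ===== SOURCE B (Python) =====
-- def GeneratePermutation(indextodistancetoaxis):
--     groups = {}
--     for index, distance in indextodistancetoaxis.items():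
--         groups.setdefault(distance, []).append(index)
--     indextopermindex = {}
--     for index, distance in indextodistancetoaxis.items():
--         if distance == 0:
--             indextopermindex[index] = index
--         else:
--             members = groups[distance]
--             if members[-1] != index:
--                 indextopermindex[index] = members[-1]
--             elif len(members) > 1:
--                 indextopermindex[index] = members[-2]
--     return indextopermindex
-- ===== Notes on version B (the rewrite author's own statement) =====
-- stated objective: faster
-- what changed: Instead of rescanning the whole dict for every key, B builds a distance->indices grouping dict in one pass and picks each key's partner as the last group member (or the second-to-last when the last is the key itself) in O(1).
import Mathlib
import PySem

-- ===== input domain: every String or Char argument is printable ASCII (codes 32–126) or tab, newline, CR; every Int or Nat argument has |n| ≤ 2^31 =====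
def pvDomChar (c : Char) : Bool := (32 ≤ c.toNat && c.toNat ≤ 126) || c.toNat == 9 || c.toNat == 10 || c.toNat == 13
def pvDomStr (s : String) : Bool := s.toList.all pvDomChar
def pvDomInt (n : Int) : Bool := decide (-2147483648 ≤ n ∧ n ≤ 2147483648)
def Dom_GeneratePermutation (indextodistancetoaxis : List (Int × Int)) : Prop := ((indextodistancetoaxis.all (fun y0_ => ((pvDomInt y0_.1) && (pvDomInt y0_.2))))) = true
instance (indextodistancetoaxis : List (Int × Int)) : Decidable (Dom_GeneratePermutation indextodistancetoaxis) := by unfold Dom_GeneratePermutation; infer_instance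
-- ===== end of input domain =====

-- B replaces A's quadratic rescan of the whole dict per key by one grouping pass
-- (distance → indices) plus an O(1) pick of the last non-self group member per key.

-- ===== PORT A =====
-- literal transliteration of A: for each (index, distance), if distance == 0 map index to itself,
-- otherwise rescan all items and overwrite with every otherindex of equal distance (last one wins).
def GeneratePermutation (indextodistancetoaxis : List (Int × Int)) : List (Int × Int) :=
  let items := (PySem.Dict.ofList indextodistancetoaxis).items
  (items.foldl (fun acc p =>
      if p.2 == 0 then acc.insert p.1 p.1
      else items.foldl (fun acc2 q =>
          if q.2 == p.2 && p.1 != q.1 then acc2.insert p.1 q.1 else acc2) acc)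
    PySem.Dict.empty).items

-- ===== PORT B =====
-- transliteration of Source B: one pass builds groups (distance → list of indices in order);
-- a second pass picks members[-1] (or members[-2] when members[-1] is the index itself).
def GeneratePermutation_alt (indextodistancetoaxis : List (Int × Int)) : List (Int × Int) :=
  let items := (PySem.Dict.ofList indextodistancetoaxis).items
  let groups : PySem.Dict Int (List Int) :=
    items.foldl (fun g p => g.modify p.2 [] (fun x => x ++ [p.1])) PySem.Dict.empty
  (items.foldl (fun acc p =>
      if p.2 == 0 then acc.insert p.1 p.1
      else
        let members := groups.getD p.2 []
        -- members[-1] / members[-2] ported via PySem.List.pyGet? (exact); the `none` branches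
        -- are unreachable, since members always contains p.1 itself, so Source B never raises here.
        match PySem.List.pyGet? members (-1) with
        | none => acc
        | some j =>
          if j != p.1 then acc.insert p.1 j
          else if members.length > 1 then
            match PySem.List.pyGet? members (-2) with
            | none => acc
            | some j2 => acc.insert p.1 j2
          else acc)
    PySem.Dict.empty).items

-- ===== PRECONDITION & SPEC =====
def Spec_GeneratePermutation (indextodistancetoaxis : List (Int × Int)) (out : List (Int × Int)) : Prop := out = GeneratePermutation_alt indextodistancetoaxis
instance (indextodistancetoaxis : List (Int × Int)) (out : List (Int × Int)) : Decidable (Spec_GeneratePermutation indextodistancetoaxis out) := by unfold Spec_GeneratePermutation; infer_instance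

-- ===== CLAIM (what is proved, stated in full; the proofs are below) =====
def Claim_equal_GeneratePermutation : Prop := ∀ (indextodistancetoaxis : List (Int × Int)), Dom_GeneratePermutation indextodistancetoaxis → Spec_GeneratePermutation indextodistancetoaxis (GeneratePermutation indextodistancetoaxis)

-- ===== LEMMAS AND PROOFS =====

-- A's inner rescan loop: repeated overwrites of key i collapse to one insert of the LAST match.
theorem pv_inner_fold (cond : Int × Int → Bool) (i : Int) (l : List (Int × Int))
    (acc : PySem.Dict Int Int) :
    l.foldl (fun a q => if cond q then a.insert i q.1 else a) acc
      = match ((l.filter cond).map Prod.fst).getLast? with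
        | none => acc
        | some j => acc.insert i j := by
  induction l using List.reverseRecOn with
  | nil => rfl
  | append_singleton l q ih =>
    rw [List.foldl_append, List.filter_append]
    by_cases hc : cond q
    · simp only [List.foldl_cons, List.foldl_nil, hc, if_pos, List.filter_cons_of_pos hc,
        List.filter_nil, List.map_append, List.map_cons, List.map_nil, List.getLast?_append]
      rw [ih]
      cases h : ((l.filter cond).map Prod.fst).getLast? with
      | none => simp
      | some j => simp [PySem.Dict.insert_insert_self]
    · simp only [List.foldl_cons, List.foldl_nil, hc, Bool.false_eq_true, if_neg,
        not_false_iff, List.filter_cons_of_neg hc, List.filter_nil, List.append_nil]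
      exact ih

-- B's grouping pass: groups.getD c [] is exactly the indices with distance c, in order.
theorem pv_group_getD (l : List (Int × Int)) (g : PySem.Dict Int (List Int)) (c : Int) :
    (l.foldl (fun d p => d.modify p.2 [] (fun x => x ++ [p.1])) g).getD c []
      = g.getD c [] ++ (l.filter (fun p => p.2 == c)).map Prod.fst := by
  have h := PySem.Dict.getD_foldl_modify_append (l.map (fun p => (p.2, p.1))) g c
  rw [List.foldl_map] at h
  simpa [List.filter_map, List.map_map, Function.comp] using h

-- B's members[-1]/members[-2] case split picks exactly the last non-self member of a nodup group.
theorem pv_pick_last (m : List Int) (x i : Int) (hm : m.Nodup) (hx : x ∈ m)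
    (acc : PySem.Dict Int Int) :
    (match PySem.List.pyGet? m (-1) with
      | none => acc
      | some j =>
        if j != x then acc.insert i j
        else if m.length > 1 then
          match PySem.List.pyGet? m (-2) with
          | none => acc
          | some j2 => acc.insert i j2
        else acc)
      = match (m.filter (fun j => x != j)).getLast? with
        | none => acc
        | some j => acc.insert i j := by
  induction m using List.reverseRecOn with
  | nil => cases hx
  | append_singleton m' b _ =>
    have hget1 : PySem.List.pyGet? (m' ++ [b]) (-1) = some b := by
      simp [PySem.List.pyGet?, PySem.List.pyIdx?]
    rw [hget1, List.filter_append]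
    by_cases hbx : b = x
    · subst hbx
      have hbm : b ∉ m' := by
        have h2 := List.nodup_append.mp hm
        intro h; exact h2.2.2 b h b (by simp) rfl
      have hfilter : m'.filter (fun j => b != j) = m' :=
        List.filter_eq_self.mpr (fun a ha => by
          simp only [bne_iff_ne]; intro h; exact hbm (h ▸ ha))
      simp only [bne_self_eq_false, Bool.false_eq_true, if_neg, not_false_iff, hfilter]
      cases m' using List.reverseRecOn with
      | nil => simp
      | append_singleton m'' b2 _ =>
        have hget2 : PySem.List.pyGet? ((m'' ++ [b2]) ++ [b]) (-2) = some b2 := by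
          simp [PySem.List.pyGet?, PySem.List.pyIdx?]
        rw [hget2]
        simp [List.getLast?_append]
    · have hb : (b != x) = true := bne_iff_ne.mpr hbx
      have hxb : (x != b) = true := bne_iff_ne.mpr (Ne.symm hbx)
      simp [hb, hxb, List.getLast?_append]

-- main equality of the two folds, on any items list with distinct keys.
theorem pv_main (items : List (Int × Int)) (hk : (items.map Prod.fst).Nodup) :
    items.foldl (fun acc p =>
      if p.2 == 0 then acc.insert p.1 p.1
      else items.foldl (fun acc2 q =>
          if q.2 == p.2 && p.1 != q.1 then acc2.insert p.1 q.1 else acc2) acc)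
      PySem.Dict.empty
    = items.foldl (fun acc p =>
      if p.2 == 0 then acc.insert p.1 p.1
      else
        let members := ((items.foldl (fun g p => g.modify p.2 [] (fun x => x ++ [p.1]))
            PySem.Dict.empty).getD p.2 [])
        match PySem.List.pyGet? members (-1) with
        | none => acc
        | some j =>
          if j != p.1 then acc.insert p.1 j
          else if members.length > 1 then
            match PySem.List.pyGet? members (-2) with
            | none => acc
            | some j2 => acc.insert p.1 j2
          else acc)
      PySem.Dict.empty := by
  apply PySem.List.foldl_congr_mem
  intro acc p hp
  by_cases h0 : (p.2 == 0) = true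
  · simp [h0]
  · simp only [h0, Bool.false_eq_true, if_neg, not_false_iff]
    rw [pv_inner_fold]
    have hgrp : ((items.foldl (fun g p => g.modify p.2 [] (fun x => x ++ [p.1]))
        PySem.Dict.empty).getD p.2 []) = (items.filter (fun q => q.2 == p.2)).map Prod.fst := by
      rw [pv_group_getD]; simp
    have hM : ((items.filter (fun q => q.2 == p.2 && p.1 != q.1)).map Prod.fst)
        = ((items.filter (fun q => q.2 == p.2)).map Prod.fst).filter (fun j => p.1 != j) := by
      rw [List.filter_map, List.filter_filter]
      simp [Function.comp, Bool.and_comm]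
    have hnd : (((items.filter (fun q => q.2 == p.2)).map Prod.fst)).Nodup :=
      hk.sublist (List.Sublist.map Prod.fst List.filter_sublist)
    have hmem : p.1 ∈ ((items.filter (fun q => q.2 == p.2)).map Prod.fst) :=
      List.mem_map_of_mem (List.mem_filter.mpr ⟨hp, by simp⟩)
    rw [hM, ← pv_pick_last _ p.1 p.1 hnd hmem acc]
    simp only [hgrp]

-- ===== VERDICT (by name: the statement is the Claim_ definition above) =====
theorem GeneratePermutation_spec : Claim_equal_GeneratePermutation := by
  intro xs _
  unfold Spec_GeneratePermutation GeneratePermutation GeneratePermutation_alt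
  have hk : (((PySem.Dict.ofList xs).items.map Prod.fst)).Nodup :=
    PySem.Dict.nodup_keys_ofList xs
  exact congrArg PySem.Dict.items (pv_main _ hk)
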